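-- pv_equiv track=rewrite | github.com/sc17rhr/Final-project | MusaddiqExtRenshaw/Alomari Code/7-semantic_grammar_generation.py | _test_Actions
-- ===== SOURCE A (Python) =====
-- def _test_Actions(element):
--     action_flag = 1
--     action_position = []
--     for count, item in enumerate(element):
--         if 'actions_' in item:
--             action_position.append(count)
--     # print action_position
--     if len(action_position) == 0:
--         action_flag = 0
--         # print 'test1'
--     elif len(action_position) > 1:
--         L = [a_i - b_i for a_i, b_i in zip(action_position[:-1], action_position[1:])]
--         for i in L:
--             if i != -1:
--                 action_flag = 0
--                 # print 'test2'
--                 # print action_position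
--     # if action_flag:
--     #     print element
--     return action_flag
-- ===== SOURCE B (Python) =====
-- def _test_Actions(element):
--     count = 0
--     first = None
--     last = None
--     for i, item in enumerate(element):
--         if 'actions_' in item:
--             count += 1
--             if first is None:
--                 first = i
--             last = i
--     if count == 0:
--         return 0
--     return 1 if last - first + 1 == count else 0
-- ===== Notes on version B (the rewrite author's own statement) =====
-- stated objective: simpler
-- what changed: One pass keeping only match count and first/last matching index, deciding consecutiveness by the span identity last-first+1 == count, instead of building a position list and scanning pairwise differences of two slices.
import Mathlib
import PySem

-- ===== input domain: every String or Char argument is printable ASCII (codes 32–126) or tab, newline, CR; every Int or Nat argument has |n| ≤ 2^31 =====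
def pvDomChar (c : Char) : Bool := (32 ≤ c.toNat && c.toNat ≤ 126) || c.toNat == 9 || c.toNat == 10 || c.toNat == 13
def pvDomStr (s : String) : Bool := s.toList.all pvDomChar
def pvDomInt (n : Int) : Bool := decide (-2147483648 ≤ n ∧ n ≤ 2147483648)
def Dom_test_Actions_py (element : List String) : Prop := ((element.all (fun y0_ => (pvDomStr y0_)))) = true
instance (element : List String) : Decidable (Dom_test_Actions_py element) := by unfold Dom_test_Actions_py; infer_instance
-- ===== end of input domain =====

-- B is a simpler one-pass version: it keeps only the match count and the first/last matching
-- index and decides consecutiveness by the span identity last-first+1 == count, instead of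
-- building the position list and scanning pairwise differences of two slices.

-- ===== PORT A =====
def test_Actions_py (element : List String) : Int :=
  let action_position : List Int :=
    (PySem.List.enumerate element 0).foldl
      (fun acc p => if PySem.Str.isIn "actions_" p.2 then acc ++ [p.1] else acc) []
  if action_position.length = 0 then 0
  else if action_position.length > 1 then
    let L : List Int :=
      ((PySem.List.slice action_position none (some (-1))).zip
        (PySem.List.slice action_position (some 1) none)).map (fun p => p.1 - p.2)
    L.foldl (fun flag i => if i ≠ -1 then 0 else flag) 1
  else 1

-- ===== PORT B =====
def test_Actions_py_alt (element : List String) : Int :=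
  let st : Int × Option Int × Option Int :=
    (PySem.List.enumerate element 0).foldl
      (fun st p =>
        if PySem.Str.isIn "actions_" p.2 then
          (st.1 + 1,
           (match st.2.1 with | none => some p.1 | some f => some f),
           some p.1)
        else st)
      (0, none, none)
  if st.1 = 0 then 0
  else
    match st.2.1, st.2.2 with
    | some f, some l => if l - f + 1 = st.1 then 1 else 0
    | _, _ => 0   -- unreachable: count ≠ 0 forces first/last set

-- ===== PRECONDITION & SPEC =====
def Spec_test_Actions_py (element : List String) (out : Int) : Prop := out = test_Actions_py_alt element
instance (element : List String) (out : Int) : Decidable (Spec_test_Actions_py element out) := by unfold Spec_test_Actions_py; infer_instance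

-- ===== CLAIM (what is proved, stated in full; the proofs are below) =====
def Claim_equal_test_Actions_py : Prop := ∀ (element : List String), Dom_test_Actions_py element → Spec_test_Actions_py element (test_Actions_py element)

-- ===== LEMMAS AND PROOFS =====

-- B's fold state, started from the summary of an already-collected position list `acc`,
-- ends in the summary (length, head?, getLast?) of acc ++ the positions collected from l.
theorem altFold_state (l : List (Int × String)) : ∀ (acc : List Int),
    l.foldl
      (fun st p =>
        if PySem.Str.isIn "actions_" p.2 then
          (st.1 + 1,
           (match st.2.1 with | none => some p.1 | some f => some f),
           some p.1)
        else st)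
      ((acc.length : Int), acc.head?, acc.getLast?)
    = (((acc ++ (l.filter (fun p => PySem.Str.isIn "actions_" p.2)).map (·.1)).length : Int),
       (acc ++ (l.filter (fun p => PySem.Str.isIn "actions_" p.2)).map (·.1)).head?,
       (acc ++ (l.filter (fun p => PySem.Str.isIn "actions_" p.2)).map (·.1)).getLast?) := by
  induction l with
  | nil => intro acc; simp
  | cons p t ih =>
    intro acc
    simp only [List.foldl_cons, List.filter_cons]
    by_cases hp : PySem.Str.isIn "actions_" p.2
    · rw [if_pos hp, if_pos hp]
      have e2 : (match acc.head? with | none => some p.1 | some f => some f)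
          = (acc ++ [p.1]).head? := by cases acc <;> simp
      have e3 : (some p.1 : Option Int) = (acc ++ [p.1]).getLast? := by simp
      have e1 : ((acc.length : Int)) + 1 = (((acc ++ [p.1]).length : Int)) := by
        simp
      rw [e2, e3, e1, ih (acc ++ [p.1])]
      simp
    · rw [if_neg hp, if_neg hp]
      exact ih acc

-- A's inner loop over the difference list returns 1 iff every element is -1.
theorem flagFold_eq (L : List Int) :
    L.foldl (fun flag i => if i ≠ -1 then 0 else flag) 1
      = (if ∀ i ∈ L, i = -1 then (1 : Int) else 0) := by
  have hz : ∀ (M : List Int), M.foldl (fun (flag : Int) i => if i ≠ -1 then 0 else flag) 0 = 0 := by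
    intro M; induction M with
    | nil => rfl
    | cons a t ih => simp only [List.foldl_cons]; split <;> exact ih
  induction L with
  | nil => simp
  | cons a t ih =>
    by_cases ha : a = -1
    · subst ha; simpa using ih
    · have h' : ¬ ∀ i ∈ a :: t, i = -1 := fun h => ha (h a (by simp))
      rw [List.foldl_cons]
      rw [if_pos (show a ≠ -1 from ha), if_neg h']
      exact hz t

-- a strictly increasing chain starting at x with tail of length |t| ends no lower than x + |t|
theorem mono_getLast? (t : List Int) : ∀ (x g : Int), (x :: t).Pairwise (· < ·) →
    (x :: t).getLast? = some g → x + t.length ≤ g := by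
  induction t with
  | nil => intro x g _ hg; simp at hg ⊢; omega
  | cons y t' ih =>
    intro x g h hg
    rw [List.getLast?_cons_cons] at hg
    have hxy : x < y := (List.pairwise_cons.1 h).1 y (by simp)
    have := ih y g (List.pairwise_cons.1 h).2 hg
    simp only [List.length_cons]
    push_cast
    omega

-- for a strictly increasing position list, all adjacent differences are -1 iff the span matches
theorem consecutive_iff_span (t : List Int) : ∀ (x : Int), (x :: t).Pairwise (· < ·) →
    ((∀ i ∈ ((x :: t).dropLast.zip (x :: t).tail).map (fun p => p.1 - p.2), i = -1)
      ↔ (x :: t).getLast? = some (x + t.length)) := by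
  induction t with
  | nil => intro x _; simp
  | cons y t' ih =>
    intro x h
    have hxy : x < y := (List.pairwise_cons.1 h).1 y (by simp)
    have htail := (List.pairwise_cons.1 h).2
    obtain ⟨g, hg⟩ : ∃ g, (y :: t').getLast? = some g := by
      cases hgl : (y :: t').getLast? with
      | none => exact absurd (List.getLast?_eq_none_iff.1 hgl) (by simp)
      | some g => exact ⟨g, rfl⟩
    have hge := mono_getLast? t' y g htail hg
    have ihy := (ih y htail).trans (by rw [hg, Option.some_inj])
    rw [List.getLast?_cons_cons, hg, Option.some_inj]
    have hdiffs : (((x :: y :: t').dropLast.zip (x :: y :: t').tail).map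
        (fun p => p.1 - p.2))
        = (x - y) :: (((y :: t').dropLast.zip (y :: t').tail).map (fun p => p.1 - p.2)) := by
      cases t' <;> simp
    rw [hdiffs, List.forall_mem_cons, ihy]
    simp only [List.length_cons]
    push_cast
    constructor
    · rintro ⟨h1, h2⟩; omega
    · intro hgl; constructor <;> omega

-- the two post-processing phases agree on any strictly increasing position list
theorem final_eq (P : List Int) (hmono : P.Pairwise (· < ·)) :
    (if P.length = 0 then (0 : Int)
     else if P.length > 1 then
       (((PySem.List.slice P none (some (-1))).zip
          (PySem.List.slice P (some 1) none)).map (fun p => p.1 - p.2)).foldl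
         (fun flag i => if i ≠ -1 then 0 else flag) 1
     else 1)
    = (if ((P.length : Int)) = 0 then (0 : Int)
       else match P.head?, P.getLast? with
            | some f, some l => if l - f + 1 = (P.length : Int) then 1 else 0
            | _, _ => 0) := by
  match P, hmono with
  | [], _ => simp
  | [x], _ => norm_num
  | x :: y :: t, hmono =>
    rw [PySem.List.slice_to_neg_one, PySem.List.slice_from_one, flagFold_eq]
    have hspan := consecutive_iff_span (y :: t) x hmono
    obtain ⟨g, hg⟩ : ∃ g, (x :: y :: t).getLast? = some g := by
      cases hgl : (x :: y :: t).getLast? with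
      | none => exact absurd (List.getLast?_eq_none_iff.1 hgl) (by simp)
      | some g => exact ⟨g, rfl⟩
    rw [hg] at hspan ⊢
    rw [Option.some_inj] at hspan
    rw [if_neg (show ¬((x :: y :: t).length = 0) by simp),
        if_pos (show (x :: y :: t).length > 1 by simp),
        if_neg (show ¬(((x :: y :: t).length : Int) = 0) by simp only [List.length_cons]; push_cast; omega)]
    simp only [List.head?_cons]
    by_cases hc : ∀ i ∈ ((x :: y :: t).dropLast.zip (x :: y :: t).tail).map
        (fun p => p.1 - p.2), i = -1
    · have hgl := hspan.1 hc
      rw [if_pos hc, if_pos (by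
        simp only [List.length_cons] at hgl ⊢
        push_cast at hgl ⊢
        omega)]
    · rw [if_neg hc, if_neg (fun hEq => hc (hspan.2 (by
        simp only [List.length_cons] at hEq ⊢
        push_cast at hEq ⊢
        omega)))]

-- ===== VERDICT (by name: the statement is the Claim_ definition above) =====
theorem test_Actions_py_spec : Claim_equal_test_Actions_py := by
  intro element _
  unfold Spec_test_Actions_py test_Actions_py test_Actions_py_alt
  simp only []
  rw [show (PySem.List.enumerate element 0).foldl
        (fun acc p => if PySem.Str.isIn "actions_" p.2 then acc ++ [p.1] else acc) []
      = ((PySem.List.enumerate element 0).filter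
          (fun p => PySem.Str.isIn "actions_" p.2)).map (·.1) from by
    simpa using PySem.List.foldl_append_if
      (fun p => PySem.Str.isIn "actions_" p.2) (·.1) (PySem.List.enumerate element 0) []]
  rw [show (PySem.List.enumerate element 0).foldl
        (fun st p =>
          if PySem.Str.isIn "actions_" p.2 then
            (st.1 + 1,
             (match st.2.1 with | none => some p.1 | some f => some f),
             some p.1)
          else st) ((0 : Int), none, none)
      = ((((PySem.List.enumerate element 0).filter
            (fun p => PySem.Str.isIn "actions_" p.2)).map (·.1) |>.length : Int),
         (((PySem.List.enumerate element 0).filter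
            (fun p => PySem.Str.isIn "actions_" p.2)).map (·.1)).head?,
         (((PySem.List.enumerate element 0).filter
            (fun p => PySem.Str.isIn "actions_" p.2)).map (·.1)).getLast?) from by
    simpa using altFold_state (PySem.List.enumerate element 0) []]
  exact final_eq _ (List.Pairwise.map _ (fun a b h => h)
    (List.Pairwise.sublist List.filter_sublist (PySem.List.pairwise_lt_enumerate element 0)))
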